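-- pv_equiv track=rewrite | github.com/DansiDanutz/ZmartBot | backend_legacy_backup/zmart-api/populate_parabolic_sar_data.py | calculate_trend_duration
-- ===== SOURCE A (Python) =====
-- def calculate_trend_duration(trend_directions):
--     """Calculate current trend duration"""
--     if not trend_directions:
--         return 0
--
--     current_trend = trend_directions[-1]
--     duration = 0
--
--     for trend in reversed(trend_directions):
--         if trend == current_trend:
--             duration += 1
--         else:
--             break
--
--     return duration
-- ===== SOURCE B (Python) =====
-- from itertools import groupby
--
-- def calculate_trend_duration(trend_directions):
--     """Calculate current trend duration"""
--     duration = 0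
--     for _, run in groupby(trend_directions):
--         duration = sum(1 for _ in run)
--     return duration
-- ===== Notes on version B (the rewrite author's own statement) =====
-- stated objective: idiomatic
-- what changed: Forward single pass with itertools.groupby that keeps the length of the most recent run, replacing the reversed scan with an early break.
import Mathlib
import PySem

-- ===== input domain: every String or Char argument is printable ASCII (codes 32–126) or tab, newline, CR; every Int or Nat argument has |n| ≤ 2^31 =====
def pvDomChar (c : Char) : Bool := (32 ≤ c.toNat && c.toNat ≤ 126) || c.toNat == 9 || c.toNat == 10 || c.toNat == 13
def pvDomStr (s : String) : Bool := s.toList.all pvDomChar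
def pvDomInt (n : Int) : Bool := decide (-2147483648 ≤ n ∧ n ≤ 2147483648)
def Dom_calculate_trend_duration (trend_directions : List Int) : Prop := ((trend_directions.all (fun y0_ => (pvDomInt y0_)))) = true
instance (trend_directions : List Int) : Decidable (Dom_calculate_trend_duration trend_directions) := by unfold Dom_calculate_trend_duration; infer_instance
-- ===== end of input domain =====

-- B replaces A's backward scan-with-break by an idiomatic forward groupby pass keeping the last run's length; same results, no speed claim.


-- ===== PORT A =====
-- the 'for trend in reversed(trend_directions): … break' loop, accumulating duration
def aLoop (current_trend : Int) (duration : Int) : List Int → Int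
  | [] => duration
  | trend :: rest => if trend = current_trend then aLoop current_trend (duration + 1) rest else duration

def calculate_trend_duration (trend_directions : List Int) : Int :=
  if trend_directions = [] then 0
  else
    match PySem.List.pyGet? trend_directions (-1) with
    | none => 0   -- unreachable (list nonempty); totalization guard only
    | some current_trend => aLoop current_trend 0 trend_directions.reverse

-- ===== PORT B =====
-- groupby step: extend the current run or start a new one; state = last run (key, count)
def altStep (s : Option (Int × Int)) (x : Int) : Option (Int × Int) :=
  match s with
  | some (k, c) => if x = k then some (k, c + 1) else some (x, 1)
  | none => some (x, 1)

def calculate_trend_duration_alt (trend_directions : List Int) : Int :=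
  match trend_directions.foldl altStep none with
  | none => 0
  | some (_, c) => c

-- ===== PRECONDITION & SPEC =====
def Spec_calculate_trend_duration (trend_directions : List Int) (out : Int) : Prop := out = calculate_trend_duration_alt trend_directions
instance (trend_directions : List Int) (out : Int) : Decidable (Spec_calculate_trend_duration trend_directions out) := by unfold Spec_calculate_trend_duration; infer_instance

-- ===== CLAIM (what is proved, stated in full; the proofs are below) =====
def Claim_equal_calculate_trend_duration : Prop := ∀ (trend_directions : List Int), Dom_calculate_trend_duration trend_directions → Spec_calculate_trend_duration trend_directions (calculate_trend_duration trend_directions)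

-- ===== LEMMAS AND PROOFS =====

-- invariant: B's fold state holds the last element as key and the trailing-run length as count,
-- and A's backward loop starting at that key adds exactly that count to its accumulator
theorem fold_inv (l : List Int) :
    (l.foldl altStep none = none ∧ l = []) ∨
    ∃ k c, l.foldl altStep none = some (k, c) ∧ l.getLast? = some k ∧
      ∀ acc, aLoop k acc l.reverse = acc + c := by
  induction l using List.reverseRecOn with
  | nil => exact Or.inl ⟨rfl, rfl⟩
  | append_singleton l x ih =>
    right
    rw [List.foldl_concat]
    rcases ih with ⟨hs, hnil⟩ | ⟨k, c, hs, hlast, hA⟩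
    · subst hnil
      refine ⟨x, 1, by simp [altStep], by simp, ?_⟩
      intro acc; simp [aLoop]
    · rw [hs]
      by_cases hx : x = k
      · subst hx
        refine ⟨x, c + 1, by simp [altStep], by simp, ?_⟩
        intro acc
        rw [List.reverse_append, List.reverse_singleton, List.singleton_append]
        simp only [aLoop]
        rw [if_pos trivial, hA (acc + 1)]; ring
      · refine ⟨x, 1, by simp [altStep, hx], by simp, ?_⟩
        intro acc
        rw [List.reverse_append, List.reverse_singleton, List.singleton_append]
        simp only [aLoop]
        rw [if_pos trivial]
        -- reverse l starts with k (the last element of l), and x ≠ k, so the loop stops at once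
        have hhead : l.reverse.head? = some k := by rw [List.head?_reverse]; exact hlast
        cases hrev : l.reverse with
        | nil => simp [aLoop]
        | cons y t =>
          rw [hrev] at hhead
          simp only [List.head?_cons, Option.some.injEq] at hhead
          subst hhead
          simp only [aLoop]
          rw [if_neg (fun h : y = x => hx h.symm)]

-- ===== VERDICT (by name: the statement is the Claim_ definition above) =====
theorem calculate_trend_duration_spec : Claim_equal_calculate_trend_duration := by
  intro l _
  unfold Spec_calculate_trend_duration calculate_trend_duration calculate_trend_duration_alt
  rcases fold_inv l with ⟨hs, hnil⟩ | ⟨k, c, hs, hlast, hA⟩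
  · subst hnil; simp [hs]
  · have hne : l ≠ [] := by
      intro h; subst h; simp at hlast
    rw [if_neg hne, PySem.List.pyGet?_neg_one, hlast, hs]
    simpa using hA 0
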